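-- pv_equiv track=rewrite | github.com/learninguser/EdYoda-HTML-CSS-Modules | Python-Django/Python/Assignments/Assignment-1/a01.py | question_tenth_solution
-- ===== SOURCE A (Python) =====
-- def question_tenth_solution(nums): # complete
--     def adj_sum_even(arr):
--         even_copy = arr.copy()
--         odd_copy = arr.copy()
--
--         even_count = 0
--         odd_count = 0
--
--         for s in arr:
--             if s % 2 == 0:
--                 even_copy.remove(s)
--                 even_count += 1
--             else:
--                 odd_copy.remove(s)
--                 odd_count += 1
--
--         if even_count > odd_count:
--             count = odd_count
--             ans = odd_copy
--         else:
--             count = even_count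
--             ans = even_copy
--         return (count, ans)
--
--     return (adj_sum_even(nums))
-- ===== SOURCE B (Python) =====
-- def question_tenth_solution(nums):
--     even_count = sum(1 for x in nums if x % 2 == 0)
--     odd_count = len(nums) - even_count
--     if even_count > odd_count:
--         return (odd_count, [x for x in nums if x % 2 == 0])
--     return (even_count, [x for x in nums if x % 2 != 0])
-- ===== Notes on version B (the rewrite author's own statement) =====
-- stated objective: simpler
-- what changed: A copies the list twice and destructively .remove()s each element from the opposite-parity copy (quadratic); B counts evens in one pass, derives the odd count from the length, and builds only the single list actually returned with a comprehension.
import Mathlib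
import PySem

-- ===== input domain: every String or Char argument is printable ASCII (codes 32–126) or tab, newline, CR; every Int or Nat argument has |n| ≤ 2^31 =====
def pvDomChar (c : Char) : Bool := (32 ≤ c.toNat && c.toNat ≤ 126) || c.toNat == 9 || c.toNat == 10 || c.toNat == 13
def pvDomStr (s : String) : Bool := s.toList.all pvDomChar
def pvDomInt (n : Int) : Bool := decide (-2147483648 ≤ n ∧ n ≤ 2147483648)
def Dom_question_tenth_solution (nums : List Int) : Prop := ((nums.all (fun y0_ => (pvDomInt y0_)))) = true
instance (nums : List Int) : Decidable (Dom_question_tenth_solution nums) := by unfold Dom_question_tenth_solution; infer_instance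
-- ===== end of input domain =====

-- B counts evens once and builds only the returned list; A builds and prunes two copies. Return values proved equal.

-- ===== PORT A =====
-- the for-loop of adj_sum_even: state (even_copy, odd_copy, even_count, odd_count).
-- list.remove(s) → PySem.List.remove?; it is always `some` here (s was copied from arr),
-- so `.getD` with the unchanged list is exact (Python would raise only in the `none` case, unreachable).
def pvLoopA : List Int → List Int → List Int → Int → Int → List Int × List Int × Int × Int
  | [], e, o, ce, co => (e, o, ce, co)
  | s :: t, e, o, ce, co =>
    if PySem.Int.mod s 2 == 0 then
      pvLoopA t ((PySem.List.remove? e s).getD e) o (ce + 1) co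
    else
      pvLoopA t e ((PySem.List.remove? o s).getD o) ce (co + 1)

def question_tenth_solution (nums : List Int) : Int × List Int :=
  match pvLoopA nums nums nums 0 0 with
  | (e, o, ce, co) => if ce > co then (co, o) else (ce, e)

-- ===== PORT B =====
def question_tenth_solution_alt (nums : List Int) : Int × List Int :=
  let even_count : Int := (nums.countP (fun x => PySem.Int.mod x 2 == 0) : Nat)
  let odd_count : Int := (nums.length : Nat) - even_count
  if even_count > odd_count then
    (odd_count, nums.filter (fun x => PySem.Int.mod x 2 == 0))
  else
    (even_count, nums.filter (fun x => !(PySem.Int.mod x 2 == 0)))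

-- ===== PRECONDITION & SPEC =====
def Spec_question_tenth_solution (nums : List Int) (out : Int × List Int) : Prop := out = question_tenth_solution_alt nums
instance (nums : List Int) (out : Int × List Int) : Decidable (Spec_question_tenth_solution nums out) := by unfold Spec_question_tenth_solution; infer_instance

-- ===== CLAIM (what is proved, stated in full; the proofs are below) =====
def Claim_equal_question_tenth_solution : Prop := ∀ (nums : List Int), Dom_question_tenth_solution nums → Spec_question_tenth_solution nums (question_tenth_solution nums)

-- ===== LEMMAS AND PROOFS =====

lemma remove_append_not_mem (P t : List Int) (s : Int) (h : s ∉ P) :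
    PySem.List.remove? (P ++ s :: t) s = some (P ++ t) := by
  induction P with
  | nil => simp [PySem.List.remove?_cons_self]
  | cons x xs ih =>
    have hx : x ≠ s := by intro hxs; exact h (by simp [hxs])
    have hm : s ∉ xs := fun hmem => h (by simp [hmem])
    rw [List.cons_append, PySem.List.remove?_cons_of_ne _ hx, ih hm]
    rfl

lemma loopA_inv (t : List Int) : ∀ (P₁ P₂ : List Int) (ce co : Int),
    (∀ x ∈ P₁, ¬ (PySem.Int.mod x 2 == 0) = true) →
    (∀ x ∈ P₂, (PySem.Int.mod x 2 == 0) = true) →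
    pvLoopA t (P₁ ++ t) (P₂ ++ t) ce co =
      (P₁ ++ t.filter (fun x => !(PySem.Int.mod x 2 == 0)),
       P₂ ++ t.filter (fun x => PySem.Int.mod x 2 == 0),
       ce + (t.countP (fun x => PySem.Int.mod x 2 == 0) : Nat),
       co + (t.countP (fun x => !(PySem.Int.mod x 2 == 0)) : Nat)) := by
  induction t with
  | nil => intro P₁ P₂ ce co _ _; simp [pvLoopA]
  | cons s t ih =>
    intro P₁ P₂ ce co h₁ h₂
    by_cases hs : (PySem.Int.mod s 2 == 0) = true
    · have hn : s ∉ P₁ := fun hm => h₁ s hm hs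
      have := ih P₁ (P₂ ++ [s]) (ce + 1) co h₁
        (by intro x hx; rcases List.mem_append.1 hx with h | h
            · exact h₂ x h
            · simpa [List.mem_singleton.1 h] using hs)
      simp only [pvLoopA, hs, if_pos, remove_append_not_mem P₁ t s hn, Option.getD_some,
        List.append_assoc, List.singleton_append] at this ⊢
      rw [this]
      simp [List.countP_cons, List.filter_cons]
      have hd : (2:Int) ∣ s := by simpa using hs
      simp [hd]
      omega
    · have hn : s ∉ P₂ := fun hm => hs (h₂ s hm)
      have := ih (P₁ ++ [s]) P₂ ce (co + 1)
        (by intro x hx; rcases List.mem_append.1 hx with h | h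
            · exact h₁ x h
            · simpa [List.mem_singleton.1 h] using hs)
        h₂
      simp only [pvLoopA, hs, if_neg, Bool.not_eq_true, remove_append_not_mem P₂ t s hn,
        Option.getD_some, List.append_assoc, List.singleton_append] at this ⊢
      rw [this]
      simp [List.countP_cons, List.filter_cons]
      have hd : s % 2 = 1 := by simpa using hs
      simp only [hd, if_pos trivial]
      refine ⟨trivial, by omega⟩

lemma countP_not_add (l : List Int) (p : Int → Bool) :
    l.countP p + l.countP (fun x => !(p x)) = l.length := by
  induction l with
  | nil => simp
  | cons x t ih =>
    by_cases h : p x = true <;> simp [h, ← ih] <;> omega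

-- ===== VERDICT (by name: the statement is the Claim_ definition above) =====
theorem question_tenth_solution_spec : Claim_equal_question_tenth_solution := by
  intro nums _
  unfold Spec_question_tenth_solution question_tenth_solution question_tenth_solution_alt
  have h := loopA_inv nums [] [] 0 0 (by simp) (by simp)
  simp only [List.nil_append, zero_add] at h
  rw [h]
  have hc := countP_not_add nums (fun x => PySem.Int.mod x 2 == 0)
  have hcast : ((nums.countP (fun x => !(PySem.Int.mod x 2 == 0)) : Nat) : Int)
      = (nums.length : Nat) - (nums.countP (fun x => PySem.Int.mod x 2 == 0) : Nat) := by
    omega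
  simp only [hcast]
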